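-- pv_equiv track=rewrite | github.com/paqogomez/unboxed | unboxed.py | restrict_words
-- ===== SOURCE A (Python) =====
-- def restrict_words(line, possible_results):
--   two_letter_options = []
--   results = []
--   for i in range(len(line)):
--     for j in range(i + 1, len(line)):
--       two_letter_options.append(line[i] + line[j])
--       two_letter_options.append(line[j] + line[i])
--
--   for word in possible_results:
--     if not any([x in word for x in two_letter_options]):
--       results.append(word)
--   return results
-- ===== SOURCE B (Python) =====
-- def restrict_words(line, possible_results):
--     counts = {}
--     for c in line:
--         counts[c] = counts.get(c, 0) + 1
--     def forbidden(word):
--         for c, d in zip(word, word[1:]):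
--             if c in counts and d in counts and (c != d or counts[c] >= 2):
--                 return True
--         return False
--     return [w for w in possible_results if not forbidden(w)]
-- ===== Notes on version B (the rewrite author's own statement) =====
-- stated objective: faster
-- what changed: B replaces A's O(L^2) enumeration of all ordered two-letter substrings of line (each substring-searched in every word) by a character-count dict built once; a word is dropped iff some adjacent pair of its characters both occur in line and (they differ or the repeated character occurs at least twice).
import Mathlib
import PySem

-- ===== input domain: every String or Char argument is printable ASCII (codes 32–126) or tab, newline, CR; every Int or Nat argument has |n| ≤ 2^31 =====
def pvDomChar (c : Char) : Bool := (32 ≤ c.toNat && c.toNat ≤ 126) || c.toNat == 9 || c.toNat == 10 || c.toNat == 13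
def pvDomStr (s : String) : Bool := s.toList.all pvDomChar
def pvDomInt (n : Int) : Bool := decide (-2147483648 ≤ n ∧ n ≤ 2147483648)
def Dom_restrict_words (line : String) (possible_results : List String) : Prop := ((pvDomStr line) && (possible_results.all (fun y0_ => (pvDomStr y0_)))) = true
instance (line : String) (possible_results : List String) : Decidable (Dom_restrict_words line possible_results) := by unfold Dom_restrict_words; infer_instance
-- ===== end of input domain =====

-- B builds a character-count dict of `line` once and tests each word's adjacent character
-- pairs against it, instead of A's quadratic enumeration of all two-letter substrings of `line`.


-- ===== PORT A =====
-- two-letter strings are represented as `List Char` (PySem string functions are wrappers over List Char; exact)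
def pvTwoLetterOptions (cs : List Char) : List (List Char) :=
  (PySem.List.pyRange 0 (cs.length : Int) 1).foldl (fun acc i =>
    (PySem.List.pyRange (i + 1) (cs.length : Int) 1).foldl (fun acc j =>
      (acc ++ [[PySem.List.pyGetD cs i ' ', PySem.List.pyGetD cs j ' ']])
           ++ [[PySem.List.pyGetD cs j ' ', PySem.List.pyGetD cs i ' ']]) acc) []

def restrict_words (line : String) (possible_results : List String) : List String :=
  let two_letter_options := pvTwoLetterOptions line.toList
  possible_results.foldl (fun results word =>
    if !((two_letter_options.map (fun x => PySem.Chars.isIn x word.toList)).any (fun b => b))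
    then results ++ [word] else results) []

-- ===== PORT B =====
def pvForbidden (counts : PySem.Dict Char Int) (w : List Char) : Bool :=
  (w.zip w.tail).any (fun p =>
    counts.contains p.1 && counts.contains p.2 &&
    (p.1 != p.2 || decide (2 ≤ counts.getD p.1 0)))

def restrict_words_alt (line : String) (possible_results : List String) : List String :=
  let counts := line.toList.foldl (fun d c => d.modify c 0 (· + 1)) PySem.Dict.empty
  possible_results.filter (fun w => !pvForbidden counts w.toList)

-- ===== PRECONDITION & SPEC =====
def Spec_restrict_words (line : String) (possible_results : List String) (out : List String) : Prop := out = restrict_words_alt line possible_results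
instance (line : String) (possible_results : List String) (out : List String) : Decidable (Spec_restrict_words line possible_results out) := by unfold Spec_restrict_words; infer_instance

-- ===== CLAIM (what is proved, stated in full; the proofs are below) =====
def Claim_equal_restrict_words : Prop := ∀ (line : String) (possible_results : List String), Dom_restrict_words line possible_results → Spec_restrict_words line possible_results (restrict_words line possible_results)

-- ===== LEMMAS AND PROOFS =====

-- A's option list as a flatMap
lemma pvTwoLetterOptions_eq (cs : List Char) :
    pvTwoLetterOptions cs =
    (PySem.List.pyRange 0 (cs.length : Int) 1).flatMap (fun i =>
      (PySem.List.pyRange (i + 1) (cs.length : Int) 1).flatMap (fun j =>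
        [[PySem.List.pyGetD cs i ' ', PySem.List.pyGetD cs j ' '],
         [PySem.List.pyGetD cs j ' ', PySem.List.pyGetD cs i ' ']])) := by
  unfold pvTwoLetterOptions
  simp only [List.append_assoc, List.singleton_append, PySem.List.foldl_append_eq_flatMap,
    List.nil_append]

-- membership in A's option list
lemma mem_pvTwoLetterOptions (cs : List Char) (x : List Char) :
    x ∈ pvTwoLetterOptions cs ↔
    ∃ (i j : Nat), ∃ (hi : i < cs.length), ∃ (hj : j < cs.length), i < j ∧
      (x = [cs[i], cs[j]] ∨ x = [cs[j], cs[i]]) := by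
  rw [pvTwoLetterOptions_eq]
  simp only [List.mem_flatMap, PySem.List.mem_pyRange_one, List.mem_cons,
    List.not_mem_nil, or_false]
  constructor
  · rintro ⟨i, ⟨h0, hin⟩, j, ⟨hij, hjn⟩, hx⟩
    have h0j : (0:Int) ≤ j := by omega
    refine ⟨i.toNat, j.toNat, by omega, by omega, by omega, ?_⟩
    rw [PySem.List.pyGetD_of_nonneg cs ' ' h0, PySem.List.pyGetD_of_nonneg cs ' ' h0j] at hx
    rw [List.getD_eq_getElem cs ' ' (by omega), List.getD_eq_getElem cs ' ' (by omega)] at hx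
    exact hx
  · rintro ⟨i, j, hi, hj, hij, hx⟩
    refine ⟨(i:Int), ⟨by omega, by omega⟩, (j:Int), ⟨by omega, by omega⟩, ?_⟩
    rw [PySem.List.pyGetD_of_nonneg cs ' ' (by omega), PySem.List.pyGetD_of_nonneg cs ' ' (by omega)]
    simp only [Int.toNat_natCast]
    rw [List.getD_eq_getElem cs ' ' (by omega), List.getD_eq_getElem cs ' ' (by omega)]
    exact hx

-- a two-character infix is an adjacent pair
lemma pair_infix_iff (a b : Char) (w : List Char) :
    [a, b] <:+: w ↔ ∃ (k : Nat), ∃ (h : k + 1 < w.length), w[k] = a ∧ w[k + 1] = b := by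
  constructor
  · rintro ⟨s, t, rfl⟩
    refine ⟨s.length, by simp, ?_, ?_⟩
    · simp
    · simp
  · rintro ⟨k, h, ha, hb⟩
    have hd : w.drop k = a :: b :: w.drop (k + 2) := by
      rw [List.drop_eq_getElem_cons (by omega), List.drop_eq_getElem_cons (by omega)]
      simp [ha, hb]
    have hpre : [a, b] <+: w.drop k := by rw [hd]; exact ⟨w.drop (k+2), rfl⟩
    exact hpre.isInfix.trans (List.drop_suffix k w).isInfix

-- count ≥ 2 ↔ two distinct positions carry the element
lemma two_le_count_iff (cs : List Char) (a : Char) :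
    2 ≤ cs.count a ↔
    ∃ (i j : Nat), ∃ (hi : i < cs.length), ∃ (hj : j < cs.length), i < j ∧ cs[i] = a ∧ cs[j] = a := by
  constructor
  · intro h
    have hd : List.Sublist [a, a] cs := List.duplicate_iff_sublist.mp (List.duplicate_iff_two_le_count.mpr h)
    obtain ⟨is, his, hp⟩ := List.sublist_eq_map_getElem hd
    rcases is with _ | ⟨i, _ | ⟨j, _ | ⟨x, rest⟩⟩⟩
    · simp at his
    · simp at his
    · have hij : (i:Nat) < j := by simpa using hp
      have h1 : cs[(i:Nat)] = a := by simpa using congrArg (·.headI) his.symm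
      have h2 : cs[(j:Nat)] = a := by
        have := congrArg (fun l => l.getD 1 ' ') his.symm
        simpa using this
      exact ⟨i, j, i.isLt, j.isLt, hij, h1, h2⟩
    · have := congrArg List.length his; simp at this
  · rintro ⟨i, j, hi, hj, hij, ha, hb⟩
    have hsub : List.Sublist [a, a] cs := by
      have := List.map_getElem_sublist (l := cs) (is := [⟨i, hi⟩, ⟨j, hj⟩]) (by simpa using hij)
      simpa [ha, hb] using this
    exact List.duplicate_iff_two_le_count.mp (List.duplicate_iff_sublist.mpr hsub)

-- the pair condition A enumerates ↔ B's count-based condition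
lemma pair_cond_iff (cs : List Char) (a b : Char) :
    (∃ (i j : Nat), ∃ (hi : i < cs.length), ∃ (hj : j < cs.length), i < j ∧
      ((cs[i] = a ∧ cs[j] = b) ∨ (cs[i] = b ∧ cs[j] = a)))
    ↔ (a ∈ cs ∧ b ∈ cs ∧ (a ≠ b ∨ 2 ≤ cs.count a)) := by
  constructor
  · rintro ⟨i, j, hi, hj, hij, hcase⟩
    have hmem : a ∈ cs ∧ b ∈ cs := by
      rcases hcase with ⟨h1, h2⟩ | ⟨h1, h2⟩
      · exact ⟨h1 ▸ List.getElem_mem hi, h2 ▸ List.getElem_mem hj⟩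
      · exact ⟨h2 ▸ List.getElem_mem hj, h1 ▸ List.getElem_mem hi⟩
    refine ⟨hmem.1, hmem.2, ?_⟩
    by_cases hab : a = b
    · right
      subst hab
      rcases hcase with ⟨h1, h2⟩ | ⟨h1, h2⟩ <;>
        exact (two_le_count_iff cs a).mpr ⟨i, j, hi, hj, hij, h1, h2⟩
    · exact Or.inl hab
  · rintro ⟨ha, hb, h⟩
    by_cases hab : a = b
    · have hcnt : 2 ≤ cs.count a := by
        rcases h with h' | h'
        · exact absurd hab h'
        · exact h'
      obtain ⟨i, j, hi, hj, hij, h1, h2⟩ := (two_le_count_iff cs a).mp hcnt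
      exact ⟨i, j, hi, hj, hij, Or.inl ⟨h1, hab ▸ h2⟩⟩
    · obtain ⟨ia, hia, h1⟩ := List.mem_iff_getElem.mp ha
      obtain ⟨ib, hib, h2⟩ := List.mem_iff_getElem.mp hb
      rcases lt_trichotomy ia ib with hlt | heq | hgt
      · exact ⟨ia, ib, hia, hib, hlt, Or.inl ⟨h1, h2⟩⟩
      · exact absurd (h1 ▸ h2 ▸ heq ▸ rfl) hab
      · exact ⟨ib, ia, hib, hia, hgt, Or.inr ⟨h2, h1⟩⟩

-- per-word agreement of A's substring test with B's count-based test
lemma any_eq_forbidden (cs w : List Char) :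
    ((pvTwoLetterOptions cs).map (fun x => PySem.Chars.isIn x w)).any (fun b => b) =
    pvForbidden (cs.foldl (fun d c => d.modify c 0 (· + 1)) PySem.Dict.empty) w := by
  have hc : cs.foldl (fun d c => d.modify c 0 (· + 1)) PySem.Dict.empty = PySem.Dict.counter cs := rfl
  rw [hc, Bool.eq_iff_iff]
  unfold pvForbidden
  rw [List.any_map, List.any_eq_true, List.any_eq_true]
  constructor
  · rintro ⟨x, hx, hin⟩
    simp only [Function.comp] at hin
    rw [PySem.Chars.isIn_iff_infix] at hin
    obtain ⟨i, j, hi, hj, hij, hcase⟩ := (mem_pvTwoLetterOptions cs x).mp hx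
    have key : ∃ (a b : Char), [a, b] <:+: w ∧
        (∃ (i j : Nat), ∃ (hi : i < cs.length), ∃ (hj : j < cs.length), i < j ∧
          ((cs[i] = a ∧ cs[j] = b) ∨ (cs[i] = b ∧ cs[j] = a))) := by
      rcases hcase with rfl | rfl
      · exact ⟨cs[i], cs[j], hin, i, j, hi, hj, hij, Or.inl ⟨rfl, rfl⟩⟩
      · exact ⟨cs[j], cs[i], hin, i, j, hi, hj, hij, Or.inr ⟨rfl, rfl⟩⟩
    obtain ⟨a, b, hinf, hpair⟩ := key
    obtain ⟨ha, hb, hor⟩ := (pair_cond_iff cs a b).mp hpair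
    obtain ⟨k, hk, hka, hkb⟩ := (pair_infix_iff a b w).mp hinf
    refine ⟨(w[k], w[k + 1]), ?_, ?_⟩
    · rw [List.mem_iff_getElem]
      refine ⟨k, by simp [List.length_zip, List.length_tail]; omega, ?_⟩
      rw [List.getElem_zip, List.getElem_tail]
    · simp only [PySem.Dict.contains_counter, PySem.Dict.getD_counter, Bool.and_eq_true,
        Bool.or_eq_true, bne_iff_ne, decide_eq_true_eq, List.contains_eq_mem]
      rw [hka, hkb]
      refine ⟨⟨by simpa using ha, by simpa using hb⟩, ?_⟩
      rcases hor with h | h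
      · exact Or.inl h
      · exact Or.inr (by exact_mod_cast h)
  · rintro ⟨p, hp, hcond⟩
    obtain ⟨k, hk, hpk⟩ := List.mem_iff_getElem.mp hp
    have hk2 : k + 1 < w.length := by
      simp [List.length_zip, List.length_tail] at hk; omega
    rw [List.getElem_zip, List.getElem_tail] at hpk
    subst hpk
    simp only [PySem.Dict.contains_counter, PySem.Dict.getD_counter, Bool.and_eq_true,
      Bool.or_eq_true, bne_iff_ne, decide_eq_true_eq, List.contains_eq_mem] at hcond
    obtain ⟨⟨ha, hb⟩, hor⟩ := hcond
    have hor' : w[k] ≠ w[k + 1] ∨ 2 ≤ cs.count w[k] := by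
      rcases hor with h | h
      · exact Or.inl h
      · exact Or.inr (by exact_mod_cast h)
    obtain ⟨i, j, hi, hj, hij, hcase⟩ :=
      (pair_cond_iff cs w[k] (w[k + 1])).mpr ⟨by simpa using ha, by simpa using hb, hor'⟩
    have hinf : [w[k], w[k + 1]] <:+: w := (pair_infix_iff _ _ w).mpr ⟨k, hk2, rfl, rfl⟩
    rcases hcase with ⟨h1, h2⟩ | ⟨h1, h2⟩
    · refine ⟨[cs[i], cs[j]], (mem_pvTwoLetterOptions cs _).mpr ⟨i, j, hi, hj, hij, Or.inl rfl⟩, ?_⟩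
      simp only [Function.comp]
      rw [PySem.Chars.isIn_iff_infix, h1, h2]
      exact hinf
    · refine ⟨[cs[j], cs[i]], (mem_pvTwoLetterOptions cs _).mpr ⟨i, j, hi, hj, hij, Or.inr rfl⟩, ?_⟩
      simp only [Function.comp]
      rw [PySem.Chars.isIn_iff_infix, h1, h2]
      exact hinf

-- ===== VERDICT (by name: the statement is the Claim_ definition above) =====
theorem restrict_words_spec : Claim_equal_restrict_words := by
  intro line possible_results _
  unfold Spec_restrict_words restrict_words restrict_words_alt
  simp only [any_eq_forbidden line.toList]
  simpa using PySem.List.foldl_append_if (fun w => !pvForbidden (line.toList.foldl (fun d c => d.modify c 0 (· + 1)) PySem.Dict.empty) w.toList) id possible_results []
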